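-- pv_equiv track=rewrite | github.com/GunvantGMC/Competitive-Programing | findthetotal.py | findTheTot
-- ===== SOURCE A (Python) =====
-- def findTheTot(n):
--     cnt = 0
--     while(len(n) != 0):
--         m = min(n)
--         mI = n.index(m)
--         cnt += m
--         if(mI == 0):
--             t1 = n[2:]
--             n = t1
--         elif(mI == len(n)-1):
--             t1 = n[:mI-1]
--             n = t1
--         else:
--             t1 = n[:mI-1]
--             t2 = n[mI+2:]
--             n = t1 + t2
--     return cnt
-- ===== SOURCE B (Python) =====
-- def findTheTot(n):
--     # Sort (value, index) pairs once; scan them, keeping a list of still-alive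
--     # original indices; each live hit removes itself and its live neighbours.
--     cnt = 0
--     alive = list(range(len(n)))
--     for _, i in sorted((v, j) for j, v in enumerate(n)):
--         if i in alive:
--             p = alive.index(i)
--             cnt += n[i]
--             del alive[max(p - 1, 0):p + 2]
--     return cnt
-- ===== Notes on version B (the rewrite author's own statement) =====
-- stated objective: alternative
-- what changed: A repeatedly rescans the whole remaining list (min + index + slicing) every iteration; B sorts the (value, index) pairs once and makes a single pass over them, maintaining a list of still-live original indices from which each hit deletes itself and its two positional neighbours.
import Mathlib
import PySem

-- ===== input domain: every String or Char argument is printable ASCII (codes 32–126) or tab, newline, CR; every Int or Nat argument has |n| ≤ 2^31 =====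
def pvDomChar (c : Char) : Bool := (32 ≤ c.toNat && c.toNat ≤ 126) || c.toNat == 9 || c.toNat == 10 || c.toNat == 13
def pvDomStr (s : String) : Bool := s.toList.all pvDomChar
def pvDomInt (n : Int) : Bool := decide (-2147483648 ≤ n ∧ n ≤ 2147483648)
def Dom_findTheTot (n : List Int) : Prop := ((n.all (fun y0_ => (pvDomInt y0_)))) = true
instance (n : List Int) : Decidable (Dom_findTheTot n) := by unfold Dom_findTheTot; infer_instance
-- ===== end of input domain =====

-- B re-implements A by a single sort of (value, index) pairs scanned once over a
-- shrinking list of live indices, instead of A's repeated min/index/slice passes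
-- (objective: alternative algorithm of similar cost).

-- ===== PORT A =====
-- cited by decreasing_by: the index of the first minimum is in range
theorem pvA_idx_lt (n : List Int) (h : n ≠ []) :
    ((PySem.List.index? n ((PySem.List.min? n (fun x => x)).getD 0)).getD 0) < n.length := by
  obtain ⟨m, hm⟩ := Option.isSome_iff_exists.mp
    (by simpa [PySem.List.min?_eq_none_iff, Option.isSome_iff_ne_none] using h :
      (PySem.List.min? n (fun x => x)).isSome)
  have hmem : m ∈ n := PySem.List.min?_mem hm
  rw [hm]
  obtain ⟨k, hk⟩ := Option.isSome_iff_exists.mp ((PySem.List.index?_isSome_iff n m).mpr hmem)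
  obtain ⟨pre, suf, hsplit, hlen, -⟩ := (PySem.List.index?_eq_some_iff n m k).mp hk
  simp only [Option.getD_some, hk]
  subst hsplit hlen
  simp

-- small arithmetic facts cited by decreasing_by (named so the proof terms stay out of the definition)
theorem pvDec0 (mI : Nat) (h0 : mI ≠ 0) : (0:Int) ≤ (mI : Int) - 1 := by omega

theorem pvDec0' (mI : Nat) : (0:Int) ≤ (mI : Int) + 2 := by omega

theorem pvDec1 (len : Nat) (h : len ≠ 0) : len - 2 < len := by omega

theorem pvDec2 (mI len : Nat) (h1 : (mI : Int) = (len : Int) - 1) :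
    min ((mI : Int) - 1).toNat len < len := by omega

theorem pvDec3 (mI len : Nat) (hlt : mI < len) :
    min ((mI : Int) - 1).toNat len + (len - ((mI : Int) + 2).toNat) < len := by omega

def findTheTotLoop (n : List Int) (cnt : Int) : Int :=
  if _hn : n.length ≠ 0 then
    let m : Int := (PySem.List.min? n (fun x => x)).getD 0
    let mI : Nat := (PySem.List.index? n m).getD 0
    let cnt' := cnt + m
    if mI = 0 then
      findTheTotLoop (PySem.List.slice n (some 2) none) cnt'
    else if (mI : Int) = (n.length : Int) - 1 then
      findTheTotLoop (PySem.List.slice n none (some ((mI : Int) - 1))) cnt'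
    else
      findTheTotLoop (PySem.List.slice n none (some ((mI : Int) - 1)) ++
                      PySem.List.slice n (some ((mI : Int) + 2)) none) cnt'
  else cnt
termination_by n.length
decreasing_by
  · rw [PySem.List.slice_from n (by decide : (0:Int) ≤ 2), List.length_drop]
    exact pvDec1 n.length _hn
  · rename_i h0 h1
    rw [PySem.List.slice_to n (pvDec0 mI h0), List.length_take]
    exact pvDec2 mI n.length h1
  · rename_i h0 _
    rw [PySem.List.slice_to n (pvDec0 mI h0), PySem.List.slice_from n (pvDec0' mI),
        List.length_append, List.length_take, List.length_drop]
    exact pvDec3 mI n.length (pvA_idx_lt n (fun h => _hn (by rw [h]; rfl)))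

def findTheTot (n : List Int) : Int := findTheTotLoop n 0

-- ===== PORT B =====
def findTheTot_alt (n : List Int) : Int :=
  let pairs := PySem.List.sorted2
      ((PySem.List.enumerate n).map (fun jv => (jv.2, jv.1))) Prod.fst Prod.snd
  let r := pairs.foldl (fun (st : Int × List Int) (vi : Int × Int) =>
      if vi.2 ∈ st.2 then
        let p : Nat := (PySem.List.index? st.2 vi.2).getD 0
        (st.1 + PySem.List.pyGetD n vi.2 0,
         PySem.List.slice st.2 none (some (max ((p : Int) - 1) 0)) ++
         PySem.List.slice st.2 (some ((p : Int) + 2)) none)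
      else st) (0, PySem.List.pyRange 0 (n.length : Int) 1)
  r.1

-- ===== PRECONDITION & SPEC =====
def Spec_findTheTot (n : List Int) (out : Int) : Prop := out = findTheTot_alt n
instance (n : List Int) (out : Int) : Decidable (Spec_findTheTot n out) := by unfold Spec_findTheTot; infer_instance

-- ===== CLAIM (what is proved, stated in full; the proofs are below) =====
def Claim_equal_findTheTot : Prop := ∀ (n : List Int), Dom_findTheTot n → Spec_findTheTot n (findTheTot n)

-- ===== LEMMAS AND PROOFS =====

-- the value of the original list at index i (all indices used are in range)
def pvVal (n : List Int) (i : Int) : Int := PySem.List.pyGetD n i 0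

-- strict lexicographic order on (value, index) pairs
def pvLexLt (a b : Int × Int) : Prop := a.1 < b.1 ∨ (a.1 = b.1 ∧ a.2 < b.2)

-- B's fold step, named for the proofs (definitionally the lambda in findTheTot_alt)
def pvStep (n : List Int) (st : Int × List Int) (vi : Int × Int) : Int × List Int :=
  if vi.2 ∈ st.2 then
    let p : Nat := (PySem.List.index? st.2 vi.2).getD 0
    (st.1 + PySem.List.pyGetD n vi.2 0,
     PySem.List.slice st.2 none (some (max ((p : Int) - 1) 0)) ++
     PySem.List.slice st.2 (some ((p : Int) + 2)) none)
  else st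

-- the comparison sorted2 Prod.fst Prod.snd uses
def pvBefore (a b : Int × Int) : Bool :=
  decide (a.1 < b.1) || (!decide (b.1 < a.1) && decide (a.2 < b.2))

theorem pvBefore_iff (a b : Int × Int) : pvBefore a b = true ↔ pvLexLt a b := by
  simp only [pvBefore, pvLexLt, Bool.or_eq_true, Bool.and_eq_true, Bool.not_eq_true',
    decide_eq_true_iff, decide_eq_false_iff_not]
  omega

theorem pvSorted2_eq (xs : List (Int × Int)) :
    PySem.List.sorted2 xs Prod.fst Prod.snd =
      xs.foldl (fun acc x => PySem.List.insertBy pvBefore x acc) [] := rfl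

theorem pvLexLt_trans {a b c : Int × Int} (h1 : pvLexLt a b) (h2 : pvLexLt b c) :
    pvLexLt a c := by
  simp only [pvLexLt] at *; omega

theorem pvLexLt_total {a b : Int × Int} (h : a.2 ≠ b.2) : pvLexLt a b ∨ pvLexLt b a := by
  simp only [pvLexLt]; omega

theorem pvInsert_pairwise (x : Int × Int) (ys : List (Int × Int))
    (hys : ys.Pairwise pvLexLt) (htot : ∀ y ∈ ys, x.2 ≠ y.2) :
    (PySem.List.insertBy pvBefore x ys).Pairwise pvLexLt := by
  induction ys with
  | nil => simp [PySem.List.insertBy]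
  | cons y ys ih =>
    rw [List.pairwise_cons] at hys
    obtain ⟨hy, hys'⟩ := hys
    rw [PySem.List.insertBy]
    by_cases hb : pvBefore x y = true
    · rw [if_pos hb]
      have hxy : pvLexLt x y := (pvBefore_iff x y).mp hb
      exact List.Pairwise.cons
        (by
          intro z hz
          rcases List.mem_cons.mp hz with rfl | hz
          · exact hxy
          · exact pvLexLt_trans hxy (hy z hz))
        (List.Pairwise.cons hy hys')
    · rw [if_neg hb]
      have hyx : pvLexLt y x := by
        rcases pvLexLt_total (htot y (by simp)) with h | h
        · exact absurd ((pvBefore_iff x y).mpr h) hb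
        · exact h
      refine List.Pairwise.cons ?_ (ih hys' (fun z hz => htot z (by simp [hz])))
      intro z hz
      rcases (PySem.List.insertBy_mem_iff pvBefore x z ys).mp hz with rfl | hz
      · exact hyx
      · exact hy z hz

theorem pvFoldl_insert_pairwise (xs acc : List (Int × Int))
    (hacc : acc.Pairwise pvLexLt)
    (hcross : ∀ a ∈ acc, ∀ b ∈ xs, a.2 ≠ b.2)
    (hxs : xs.Pairwise (fun a b => a.2 ≠ b.2)) :
    (xs.foldl (fun acc x => PySem.List.insertBy pvBefore x acc) acc).Pairwise pvLexLt := by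
  induction xs generalizing acc with
  | nil => simpa using hacc
  | cons x xs ih =>
    rw [List.pairwise_cons] at hxs
    obtain ⟨hx, hxs'⟩ := hxs
    simp only [List.foldl_cons]
    refine ih _ (pvInsert_pairwise x acc hacc
      (fun y hy => (hcross y hy x (by simp)).symm) ) ?_ hxs'
    intro a ha b hb
    rcases (PySem.List.insertBy_mem_iff pvBefore x a acc).mp ha with rfl | ha
    · exact hx b hb
    · exact hcross a ha b (by simp [hb])

theorem pvSorted2_pairwise (xs : List (Int × Int))
    (hxs : xs.Pairwise (fun a b => a.2 ≠ b.2)) :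
    (PySem.List.sorted2 xs Prod.fst Prod.snd).Pairwise pvLexLt := by
  rw [pvSorted2_eq]
  exact pvFoldl_insert_pairwise xs [] List.Pairwise.nil (by simp) hxs

theorem pvLoop_nil (c : Int) : findTheTotLoop [] c = c := by
  rw [findTheTotLoop]; simp

-- one iteration of A's while loop, with the min's value and first index supplied
theorem pvLoopA (vs : List Int) (c v : Int) (p : Nat)
    (hmin : (PySem.List.min? vs (fun x => x)).getD 0 = v)
    (hidx : (PySem.List.index? vs v).getD 0 = p)
    (hplt : p < vs.length) :
    findTheTotLoop vs c =
      findTheTotLoop (vs.take (p - 1) ++ vs.drop (p + 2)) (c + v) := by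
  rw [findTheTotLoop]
  rw [dif_pos (by omega : vs.length ≠ 0)]
  simp only [hmin, hidx]
  by_cases h0 : p = 0
  · subst h0
    rw [if_pos rfl, PySem.List.slice_from vs (by omega : (0:Int) ≤ 2)]
    simp
  · rw [if_neg h0]
    by_cases h1 : (p : Int) = (vs.length : Int) - 1
    · rw [if_pos h1, PySem.List.slice_to vs (by omega : (0:Int) ≤ (p : Int) - 1)]
      have ht : ((p : Int) - 1).toNat = p - 1 := by omega
      have hd : vs.drop (p + 2) = [] := by
        rw [List.drop_eq_nil_iff]; omega
      rw [ht, hd, List.append_nil]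
    · rw [if_neg h1, PySem.List.slice_to vs (by omega : (0:Int) ≤ (p : Int) - 1),
          PySem.List.slice_from vs (by omega : (0:Int) ≤ (p : Int) + 2)]
      have ht : ((p : Int) - 1).toNat = p - 1 := by omega
      have ht2 : ((p : Int) + 2).toNat = p + 2 := by omega
      rw [ht, ht2]

theorem pvScan (n : List Int) (s : List (Int × Int)) (alive : List Int) (c : Int)
    (hs : s.Pairwise pvLexLt)
    (hval : ∀ p ∈ s, p.1 = pvVal n p.2)
    (hsub : ∀ i ∈ alive, (pvVal n i, i) ∈ s)
    (hasc : alive.Pairwise (· < ·)) :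
    (s.foldl (pvStep n) (c, alive)).1 = findTheTotLoop (alive.map (pvVal n)) c := by
  induction s generalizing alive c with
  | nil =>
    cases alive with
    | nil => simp [pvLoop_nil]
    | cons a t => exact absurd (hsub a (by simp)) (by simp)
  | cons hd t ih =>
    obtain ⟨v, i⟩ := hd
    rw [List.pairwise_cons] at hs
    obtain ⟨hhead, hs'⟩ := hs
    by_cases hmem : i ∈ alive
    · -- the head pair is still alive: one step of A happens here
      have hvi : v = pvVal n i := hval (v, i) (by simp)
      obtain ⟨p, hp⟩ : ∃ p, PySem.List.index? alive i = some p :=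
        Option.isSome_iff_exists.mp ((PySem.List.index?_isSome_iff alive i).mpr hmem)
      obtain ⟨pre, suf, hsplit, hplen, -⟩ := (PySem.List.index?_eq_some_iff alive i p).mp hp
      have hasc2 := hasc
      rw [hsplit, List.pairwise_append] at hasc2
      obtain ⟨hpre, hisuf, hcross⟩ := hasc2
      have hprelt : ∀ j ∈ pre, j < i := fun j hj => hcross j hj i (by simp)
      have hsuflt : ∀ j ∈ suf, i < j := (List.pairwise_cons.mp hisuf).1
      have hmemt : ∀ j ∈ alive, j ≠ i → (pvVal n j, j) ∈ t := by
        intro j hj hne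
        rcases List.mem_cons.mp (hsub j hj) with heq | h
        · exact absurd (congrArg Prod.snd heq) (by simpa using hne)
        · exact h
      have hlex : ∀ j ∈ alive, j ≠ i → pvLexLt (v, i) (pvVal n j, j) :=
        fun j hj hne => hhead _ (hmemt j hj hne)
      have hle : ∀ j ∈ alive, v ≤ pvVal n j := by
        intro j hj
        by_cases hji : j = i
        · subst hji; exact le_of_eq hvi
        · have h := hlex j hj hji
          simp only [pvLexLt] at h
          omega
      have hvs_split : alive.map (pvVal n) = pre.map (pvVal n) ++ v :: suf.map (pvVal n) := by
        rw [hsplit]; simp [hvi]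
      have hvnotpre : v ∉ pre.map (pvVal n) := by
        simp only [List.mem_map]
        rintro ⟨j, hj, hveq⟩
        have hjal : j ∈ alive := by rw [hsplit]; simp [hj]
        have hjlt := hprelt j hj
        have h := hlex j hjal (by omega)
        simp only [pvLexLt] at h
        omega
      have hidx : (PySem.List.index? (alive.map (pvVal n)) v).getD 0 = p := by
        rw [(PySem.List.index?_eq_some_iff (alive.map (pvVal n)) v p).mpr
          ⟨pre.map (pvVal n), suf.map (pvVal n), hvs_split, by simp [hplen], hvnotpre⟩]
        rfl
      have hminv : (PySem.List.min? (alive.map (pvVal n)) (fun x => x)).getD 0 = v := by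
        have hne : alive.map (pvVal n) ≠ [] := by rw [hvs_split]; simp
        obtain ⟨m, hm⟩ := Option.isSome_iff_exists.mp
          (by simpa [PySem.List.min?_eq_none_iff, Option.isSome_iff_ne_none] using hne :
            (PySem.List.min? (alive.map (pvVal n)) (fun x => x)).isSome)
        have hmm : m ∈ alive.map (pvVal n) := PySem.List.min?_mem hm
        have h1 : m ≤ v := PySem.List.min?_isMin hm v (by rw [hvs_split]; simp)
        have h2 : v ≤ m := by
          obtain ⟨j, hj, rfl⟩ := List.mem_map.mp hmm
          exact hle j hj
        rw [hm, Option.getD_some]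
        omega
      have hplt : p < (alive.map (pvVal n)).length := by
        rw [hvs_split]
        simp [hplen]
      -- one A-step
      rw [pvLoopA _ c v p hminv hidx hplt]
      -- one B-step
      rw [List.foldl_cons]
      have hstep : pvStep n (c, alive) (v, i) =
          (c + v, alive.take (p - 1) ++ alive.drop (p + 2)) := by
        simp only [pvStep, if_pos (show (v, i).2 ∈ (c, alive).2 from hmem)]
        rw [show PySem.List.index? (c, alive).2 (v, i).2 = some p from hp]
        simp only [Option.getD_some]
        rw [PySem.List.slice_to alive (le_max_right _ _),
            PySem.List.slice_from alive (by omega : (0:Int) ≤ (p : Int) + 2)]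
        have ht : (max ((p : Int) - 1) 0).toNat = p - 1 := by omega
        have ht2 : ((p : Int) + 2).toNat = p + 2 := by omega
        rw [ht, ht2]
        rw [show PySem.List.pyGetD n (v, i).2 0 = v from hvi.symm]
      rw [hstep]
      -- invariants for the tail
      have hdrop_suf : alive.drop (p + 2) = suf.drop 1 := by
        have h1 : alive.drop (p + 1) = suf := by
          rw [hsplit, show pre ++ i :: suf = (pre ++ [i]) ++ suf by simp,
              show p + 1 = (pre ++ [i]).length by simp [hplen], List.drop_left]
        rw [← h1, List.drop_drop]
      have hsubl : (alive.take (p - 1) ++ alive.drop (p + 2)).Sublist alive := by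
        have h2 := List.drop_sublist (p + 2 - (p - 1)) (alive.drop (p - 1))
        rw [List.drop_drop] at h2
        have h3 : p - 1 + (p + 2 - (p - 1)) = p + 2 := by omega
        rw [h3] at h2
        have h4 := List.Sublist.append_left h2 (alive.take (p - 1))
        rwa [List.take_append_drop] at h4
      have hsub' : ∀ j ∈ alive.take (p - 1) ++ alive.drop (p + 2), (pvVal n j, j) ∈ t := by
        intro j hj
        have hjal : j ∈ alive := hsubl.subset hj
        have hjne : j ≠ i := by
          rcases List.mem_append.mp hj with h | h
          · have hjpre : j ∈ pre := by
              rw [hsplit, List.take_append_of_le_length (by omega)] at h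
              exact List.take_subset _ _ h
            have := hprelt j hjpre; omega
          · have hjsuf : j ∈ suf := by
              rw [hdrop_suf] at h
              exact List.drop_subset _ _ h
            have := hsuflt j hjsuf; omega
        exact hmemt j hjal hjne
      have hmapnew : (alive.take (p - 1) ++ alive.drop (p + 2)).map (pvVal n) =
          (alive.map (pvVal n)).take (p - 1) ++ (alive.map (pvVal n)).drop (p + 2) := by
        simp [List.map_take, List.map_drop]
      rw [ih _ (c + v) hs' (fun q hq => hval q (by simp [hq])) hsub' (hasc.sublist hsubl),
          hmapnew]
    · -- dead pair: B skips it, nothing changes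
      rw [List.foldl_cons,
          show pvStep n (c, alive) (v, i) = (c, alive) from by
            simp only [pvStep]; rw [if_neg (by simpa using hmem)]]
      refine ih alive c hs' (fun q hq => hval q (by simp [hq])) ?_ hasc
      intro j hj
      rcases List.mem_cons.mp (hsub j hj) with heq | h
      · exact absurd (congrArg Prod.snd heq).symm (by simp; rintro rfl; exact hmem hj)
      · exact h

-- ===== VERDICT (by name: the statement is the Claim_ definition above) =====
theorem findTheTot_spec : Claim_equal_findTheTot := by
  unfold Claim_equal_findTheTot
  intro n _
  unfold Spec_findTheTot findTheTot findTheTot_alt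
  show findTheTotLoop n 0 =
    ((PySem.List.sorted2 ((PySem.List.enumerate n).map (fun jv => (jv.2, jv.1)))
        Prod.fst Prod.snd).foldl (pvStep n) (0, PySem.List.pyRange 0 (n.length : Int) 1)).1
  have hperm := PySem.List.sorted2_perm
    ((PySem.List.enumerate n).map (fun jv => (jv.2, jv.1))) Prod.fst Prod.snd false
  have hmem0 : ∀ q, q ∈ (PySem.List.sorted2 ((PySem.List.enumerate n).map (fun jv => (jv.2, jv.1)))
      Prod.fst Prod.snd) ↔ ∃ (k : Nat), k < n.length ∧ q = ((n.getD k 0 : Int), (k : Int)) := by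
    intro q
    rw [hperm.mem_iff]
    simp only [List.mem_map, PySem.List.mem_enumerate_iff]
    constructor
    · rintro ⟨jv, ⟨k, hk, rfl⟩, rfl⟩
      exact ⟨k, hk, by simp [List.getElem?_eq_getElem hk]⟩
    · rintro ⟨k, hk, rfl⟩
      exact ⟨((k : Int), n[k]), ⟨k, hk, by simp⟩, by simp [List.getElem?_eq_getElem hk]⟩
  have hsnd : ((PySem.List.enumerate n).map (fun jv => (jv.2, jv.1))).Pairwise
      (fun a b => a.2 ≠ b.2) := by
    refine List.Pairwise.map _ ?_ (PySem.List.pairwise_lt_enumerate n 0)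
    intro a b hab
    simp only []
    omega
  have hval0 : ∀ q ∈ (PySem.List.sorted2 ((PySem.List.enumerate n).map (fun jv => (jv.2, jv.1)))
      Prod.fst Prod.snd), q.1 = pvVal n q.2 := by
    intro q hq
    obtain ⟨k, hk, rfl⟩ := (hmem0 q).mp hq
    simp [pvVal, List.getElem?_eq_getElem hk]
  have hsub0 : ∀ i ∈ PySem.List.pyRange 0 (n.length : Int) 1,
      (pvVal n i, i) ∈ (PySem.List.sorted2 ((PySem.List.enumerate n).map (fun jv => (jv.2, jv.1)))
        Prod.fst Prod.snd) := by
    intro i hi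
    rw [PySem.List.mem_pyRange_one] at hi
    refine (hmem0 _).mpr ⟨i.toNat, by omega, ?_⟩
    have : (i.toNat : Int) = i := by omega
    rw [pvVal, PySem.List.pyGetD_eq_getElem n 0 (by omega) (by simpa using hi.2)]
    rw [List.getD_eq_getElem n 0 (show i.toNat < n.length by omega), this]
  rw [pvScan n _ _ 0 (pvSorted2_pairwise _ hsnd) hval0 hsub0
      (PySem.List.pairwise_lt_pyRange_one 0 (n.length : Int) )]
  rw [show (PySem.List.pyRange 0 (n.length : Int) 1).map (pvVal n) = n from
    PySem.List.map_pyGetD_pyRange_zero' n 0]
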